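-- pv_equiv track=rewrite | github.com/arHSM/surfers-camp-utilities | src/extensions/utils.py | role_diff
-- ===== SOURCE A (Python) =====
-- def role_diff(
--     roles: list[int], selected: list[int]
-- ) -> tuple[list[int], list[int], list[int]]:
--     new_roles: list[int] = []
--     removed: list[int] = []
--
--     for role in roles:
--         if role in selected:
--             selected.remove(role)
--             removed.append(role)
--             continue
--         new_roles.append(role)
--
--     new_roles.extend(selected)
--
--     return (new_roles, selected, removed)
-- ===== SOURCE B (Python) =====
-- def role_diff(
--     roles: list[int], selected: list[int]
-- ) -> tuple[list[int], list[int], list[int]]: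
--     # Count occurrences of each selected id once, then classify roles in one pass.
--     # Note: unlike A, this does not mutate `selected` in place (return value is identical).
--     cnt: dict[int, int] = {}
--     for v in selected:
--         cnt[v] = cnt.get(v, 0) + 1
--
--     new_roles: list[int] = []
--     removed: list[int] = []
--     for r in roles:
--         if cnt.get(r, 0) > 0:
--             cnt[r] = cnt.get(r, 0) - 1
--             removed.append(r)
--         else:
--             new_roles.append(r)
--
--     # Rebuild the remaining selected: drop the FIRST `consumed[v]` occurrences of each v.
--     consumed: dict[int, int] = {}
--     for r in removed:
--         consumed[r] = consumed.get(r, 0) + 1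
--
--     remaining: list[int] = []
--     for v in selected:
--         c = consumed.get(v, 0)
--         if c > 0:
--             consumed[v] = c - 1
--         else:
--             remaining.append(v)
--
--     return (new_roles + remaining, remaining, removed)
-- ===== Notes on version B (the rewrite author's own statement) =====
-- stated objective: faster
-- what changed: Replaces the per-role linear membership test and list.remove on `selected` with a count dictionary built once (decrement instead of remove) and a second skip-pass over `selected` to rebuild the remaining list, turning O(n*m) into O(n+m); B does not mutate `selected` in place.
import Mathlib
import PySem

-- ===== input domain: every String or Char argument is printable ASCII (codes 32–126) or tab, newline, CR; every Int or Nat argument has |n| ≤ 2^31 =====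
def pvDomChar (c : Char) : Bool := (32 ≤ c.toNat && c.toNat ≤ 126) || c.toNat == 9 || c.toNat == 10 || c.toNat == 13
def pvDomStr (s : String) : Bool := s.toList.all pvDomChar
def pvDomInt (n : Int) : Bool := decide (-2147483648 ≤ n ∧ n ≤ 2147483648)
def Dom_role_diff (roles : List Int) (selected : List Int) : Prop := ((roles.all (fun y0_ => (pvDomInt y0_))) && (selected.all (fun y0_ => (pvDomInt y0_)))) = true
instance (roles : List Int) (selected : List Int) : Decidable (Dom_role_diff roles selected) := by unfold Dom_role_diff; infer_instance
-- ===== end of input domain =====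

-- B replaces the O(n*m) membership/remove loop by a count dictionary plus a skip-pass (O(n+m));
-- A mutates `selected` in place (B does not); the equivalence proved here is about the return value.

-- ===== PORT A =====
-- the for-loop over roles, state (new_roles, selected, removed); `in` = contains, `.remove` = erase (first match)
def roleLoopA : List Int → List Int → List Int → List Int → List Int × List Int × List Int
  | [], s, new, removed => (new, s, removed)
  | role :: rest, s, new, removed =>
    if s.contains role then roleLoopA rest (s.erase role) new (removed ++ [role])
    else roleLoopA rest s (new ++ [role]) removed

def role_diff (roles : List Int) (selected : List Int) : List Int × List Int × List Int :=
  let r := roleLoopA roles selected [] []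
  (r.1 ++ r.2.1, r.2.1, r.2.2)

-- ===== PORT B =====
-- cnt[v] = cnt.get(v, 0) + 1 loop (counter building)
def countB (xs : List Int) (d : PySem.Dict Int Int) : PySem.Dict Int Int :=
  xs.foldl (fun d v => d.insert v (d.getD v 0 + 1)) d

-- the classification loop over roles with the count dict
def roleLoopB : List Int → PySem.Dict Int Int → List Int → List Int → List Int × List Int
  | [], _, new, removed => (new, removed)
  | r :: rest, d, new, removed =>
    if d.getD r 0 > 0 then roleLoopB rest (d.insert r (d.getD r 0 - 1)) new (removed ++ [r])
    else roleLoopB rest d (new ++ [r]) removed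

-- the rebuild loop: skip the first consumed[v] occurrences of each v
def skipB : List Int → PySem.Dict Int Int → List Int → List Int
  | [], _, acc => acc
  | v :: rest, d, acc =>
    let c := d.getD v 0
    if c > 0 then skipB rest (d.insert v (c - 1)) acc
    else skipB rest d (acc ++ [v])

def role_diff_alt (roles : List Int) (selected : List Int) : List Int × List Int × List Int :=
  let cnt := countB selected PySem.Dict.empty
  let nr := roleLoopB roles cnt [] []
  let consumed := countB nr.2 PySem.Dict.empty
  let remaining := skipB selected consumed []
  (nr.1 ++ remaining, remaining, nr.2)

-- ===== PRECONDITION & SPEC =====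
def Spec_role_diff (roles : List Int) (selected : List Int) (out : List Int × List Int × List Int) : Prop := out = role_diff_alt roles selected
instance (roles : List Int) (selected : List Int) (out : List Int × List Int × List Int) : Decidable (Spec_role_diff roles selected out) := by unfold Spec_role_diff; infer_instance

-- ===== CLAIM (what is proved, stated in full; the proofs are below) =====
def Claim_equal_role_diff : Prop := ∀ (roles : List Int) (selected : List Int), Dom_role_diff roles selected → Spec_role_diff roles selected (role_diff roles selected)

-- ===== LEMMAS AND PROOFS =====

-- abstract skip-pass over a count function
def sp (f : Int → Int) : List Int → List Int
  | [] => []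
  | v :: rest => if f v > 0 then sp (fun w => if w = v then f v - 1 else f w) rest
                 else v :: sp f rest

theorem sp_congr (sel : List Int) : ∀ (f g : Int → Int), (∀ v, f v = g v) →
    sp f sel = sp g sel := by
  induction sel with
  | nil => intro f g _; rfl
  | cons v rest ih =>
    intro f g h
    simp only [sp, h v]
    by_cases hv : g v > 0
    · simp only [hv, if_pos]
      exact ih _ _ (fun w => by by_cases hw : w = v <;> simp [hw, h w])
    · simp only [hv, if_neg, not_false_iff]
      rw [ih f g h]

theorem countB_getD (xs : List Int) (v : Int) :
    (countB xs PySem.Dict.empty).getD v 0 = (xs.count v : Int) := by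
  simp [countB, PySem.Dict.getD_foldl_insert_add_one, PySem.Dict.getD_empty]

theorem skipB_eq_sp (sel : List Int) : ∀ (d : PySem.Dict Int Int) (acc : List Int),
    skipB sel d acc = acc ++ sp (fun v => d.getD v 0) sel := by
  induction sel with
  | nil => intro d acc; simp [skipB, sp]
  | cons v rest ih =>
    intro d acc
    simp only [skipB, sp]
    by_cases h : d.getD v 0 > 0
    · simp only [h, if_pos]
      rw [ih]
      congr 1
      apply sp_congr
      intro w
      rw [PySem.Dict.getD_insert]
    · simp only [h, if_neg, not_false_iff]
      rw [ih]
      simp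

theorem sp_zero (sel : List Int) (f : Int → Int) (h : ∀ v, f v = 0) : sp f sel = sel := by
  induction sel generalizing f with
  | nil => rfl
  | cons v rest ih =>
    simp only [sp, h v]
    norm_num
    exact ih f h

theorem sp_erase (sel : List Int) : ∀ (f : Int → Int) (r : Int), (∀ v, 0 ≤ f v) →
    sp (fun v => if v = r then f v + 1 else f v) sel = sp f (sel.erase r) := by
  induction sel with
  | nil => intro f r _; rfl
  | cons v rest ih =>
    intro f r hnn
    by_cases hvr : v = r
    · subst hvr
      rw [List.erase_cons_head]
      simp only [sp, if_true]
      rw [if_pos (show f v + 1 > 0 by have := hnn v; omega)]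
      apply sp_congr
      intro w
      by_cases hw : w = v <;> simp [hw] <;> omega
    · rw [List.erase_cons_tail (by simp [hvr])]
      have hgv : (if v = r then f v + 1 else f v) = f v := by simp [hvr]
      simp only [sp, hgv]
      by_cases hfv : f v > 0
      · simp only [hfv, if_pos]
        have hf' : ∀ u, 0 ≤ (fun u => if u = v then f v - 1 else f u) u := by
          intro u; by_cases hu : u = v <;> simp [hu] <;> [omega; exact hnn u]
        calc sp (fun w => if w = v then f v - 1 else if w = r then f w + 1 else f w) rest
            = sp (fun w => if w = r then (if w = v then f v - 1 else f w) + 1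
                           else (if w = v then f v - 1 else f w)) rest := by
              apply sp_congr; intro w
              by_cases hwv : w = v <;> by_cases hwr : w = r <;>
                simp [hwv, hwr, hvr] at * <;> omega
          _ = sp (fun u => if u = v then f v - 1 else f u) (rest.erase r) := ih _ r hf'
          _ = sp (fun w => if w = v then f v - 1 else f w) (rest.erase r) := rfl
      · simp only [hfv, if_neg, not_false_iff]
        rw [ih f r hnn]

theorem sp_count (rs : List Int) : ∀ (sel : List Int),
    sp (fun v => (rs.count v : Int)) sel = List.foldl (fun s r => s.erase r) sel rs := by
  induction rs with
  | nil =>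
    intro sel
    simp only [List.foldl_nil]
    exact sp_zero sel _ (fun v => by simp)
  | cons r rs ih =>
    intro sel
    simp only [List.foldl_cons]
    rw [← ih (sel.erase r), ← sp_erase sel (fun v => (rs.count v : Int)) r (fun v => by positivity)]
    apply sp_congr
    intro v
    by_cases hv : v = r
    · simp [hv]
    · simp [hv, Ne.symm hv]

-- the removed accumulator only prepends; the remaining-selected output ignores both accumulators
theorem roleLoopA_removed_acc (roles : List Int) : ∀ (s new removed : List Int),
    (roleLoopA roles s new removed).2.2 = removed ++ (roleLoopA roles s new []).2.2 ∧
    (roleLoopA roles s new removed).2.1 = (roleLoopA roles s new []).2.1 := by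
  induction roles with
  | nil => intro s new removed; simp [roleLoopA]
  | cons role rest ih =>
    intro s new removed
    simp only [roleLoopA, List.nil_append]
    by_cases h : s.contains role
    · simp only [h, if_pos]
      obtain ⟨h1, h2⟩ := ih (s.erase role) new (removed ++ [role])
      obtain ⟨h1', h2'⟩ := ih (s.erase role) new [role]
      constructor
      · rw [h1, h1']; simp
      · rw [h2, h2']
    · simp only [h, if_neg, Bool.false_eq_true, not_false_iff]
      exact ih s (new ++ [role]) removed

-- the final remaining selected list is `selected` with the removed ids erased in order
theorem roleLoopA_sfinal (roles : List Int) : ∀ (s new : List Int),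
    (roleLoopA roles s new []).2.1 =
      List.foldl (fun s r => s.erase r) s ((roleLoopA roles s new []).2.2) := by
  induction roles with
  | nil => intro s new; simp [roleLoopA]
  | cons role rest ih =>
    intro s new
    simp only [roleLoopA, List.nil_append]
    by_cases h : s.contains role
    · simp only [h, if_pos]
      obtain ⟨h1, h2⟩ := roleLoopA_removed_acc rest (s.erase role) new [role]
      rw [h1, h2, List.singleton_append, List.foldl_cons]
      exact ih (s.erase role) new
    · simp only [h, if_neg, Bool.false_eq_true, not_false_iff]
      exact ih s (new ++ [role])

-- the B loop with a faithful count dict computes A's (new, removed)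
theorem loopB_eq_loopA (roles : List Int) : ∀ (s : List Int) (d : PySem.Dict Int Int)
    (new removed : List Int), (∀ r, d.getD r 0 = (s.count r : Int)) →
    roleLoopB roles d new removed = ((roleLoopA roles s new removed).1, (roleLoopA roles s new removed).2.2) := by
  induction roles with
  | nil => intro s d new removed _; simp [roleLoopA, roleLoopB]
  | cons role rest ih =>
    intro s d new removed hd
    simp only [roleLoopA, roleLoopB]
    by_cases h : s.contains role
    · have hmem : role ∈ s := by simpa using h
      have hpos : d.getD role 0 > 0 := by
        rw [hd role]
        exact_mod_cast List.count_pos_iff.mpr hmem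
      simp only [h, if_pos, hpos]
      apply ih (s.erase role)
      intro r
      rw [PySem.Dict.getD_insert]
      by_cases hr : r = role
      · subst hr
        rw [if_pos rfl, hd r, List.count_erase_self]
        have hc : 0 < s.count r := List.count_pos_iff.mpr hmem
        omega
      · rw [if_neg hr, hd r, List.count_erase_of_ne hr]
    · have hnmem : role ∉ s := by simpa using h
      have hz : ¬ d.getD role 0 > 0 := by
        rw [hd role]
        simp [List.count_eq_zero_of_not_mem hnmem]
      simp only [h, if_neg, hz, Bool.false_eq_true, not_false_iff]
      exact ih s d (new ++ [role]) removed hd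

-- ===== VERDICT (by name: the statement is the Claim_ definition above) =====
theorem role_diff_spec : Claim_equal_role_diff := by
  intro roles selected _
  unfold Spec_role_diff
  have hcnt : ∀ r, (countB selected PySem.Dict.empty).getD r 0 = (selected.count r : Int) :=
    fun r => countB_getD selected r
  have hloop := loopB_eq_loopA roles selected (countB selected PySem.Dict.empty) [] [] hcnt
  have hrem : skipB selected (countB (roleLoopA roles selected [] []).2.2 PySem.Dict.empty) []
      = (roleLoopA roles selected [] []).2.1 := by
    rw [skipB_eq_sp, List.nil_append]
    rw [sp_congr selected _ (fun v => (((roleLoopA roles selected [] []).2.2).count v : Int))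
        (fun v => countB_getD _ v), sp_count]
    exact (roleLoopA_sfinal roles selected []).symm
  simp only [role_diff, role_diff_alt, hloop, hrem]
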